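-- pv_equiv track=rewrite | github.com/JoshuaFancher25/AlgoExpertProblems | sandBoxTripletCount.py | triplet_modulus
-- ===== SOURCE A (Python) =====
-- def triplet_modulus(array, d):
--     array.sort()
--     length = len(array)
--     count = 0
--     if len(array) < 3:
--         return 0
--     for i in range(length-2):
--         for j in range(i+1, length-1):
--             for k in range(j+1, length):
--                 triplet_sum = array[i] + array[j] + array[k]
--                 if (triplet_sum % d) == 0:
--                     count += 1
--     return count
-- ===== SOURCE B (Python) =====
-- # Single left-to-right pass with a dict of pair-sum residues: O(n^2) instead of A's O(n^3) triple loop.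
-- # (A sorts its argument in place; B does not mutate it — the equivalence claimed is about the return value.)
-- def triplet_modulus(array, d):
--     if len(array) < 3:
--         return 0
--     total = 0
--     cnt2 = {}   # residue of (earlier pair sum) % d  ->  number of such pairs
--     seen = []
--     for x in array:
--         total += cnt2.get((-x) % d, 0)
--         for y in seen:
--             key = (x + y) % d
--             cnt2[key] = cnt2.get(key, 0) + 1
--         seen.append(x)
--     return total
-- ===== Notes on version B (the rewrite author's own statement) =====
-- stated objective: faster
-- what changed: Replaced the sort plus O(n^3) triple index loop by a single left-to-right pass that keeps a dict counting residues of pair sums seen so far, adding for each new element the number of earlier pairs whose sum residue completes a multiple of d.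
import Mathlib
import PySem

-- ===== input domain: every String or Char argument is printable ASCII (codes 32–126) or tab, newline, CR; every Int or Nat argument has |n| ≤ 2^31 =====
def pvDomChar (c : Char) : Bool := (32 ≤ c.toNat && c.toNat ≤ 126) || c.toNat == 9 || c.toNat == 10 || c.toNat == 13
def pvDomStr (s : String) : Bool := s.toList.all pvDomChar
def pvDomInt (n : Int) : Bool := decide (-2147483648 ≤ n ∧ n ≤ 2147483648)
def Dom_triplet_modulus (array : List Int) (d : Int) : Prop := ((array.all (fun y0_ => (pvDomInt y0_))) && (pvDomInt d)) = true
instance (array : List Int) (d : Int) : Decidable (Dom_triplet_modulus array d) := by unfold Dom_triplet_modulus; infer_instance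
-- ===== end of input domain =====

-- B replaces A's sort + O(n^3) triple index loop by one left-to-right pass with a dict counting
-- residues of pair sums seen so far.  A sorts its argument in place, B does not mutate it:
-- the equivalence proved here is about the return value.

-- ===== PORT A =====
-- Literal transliteration of A.  array.sort() = PySem.List.sorted (identity key, not reversed);
-- every index i/j/k the ranges produce is in range for arr, so pyGetD arr _ 0 computes exactly
-- what Python's arr[_] returns there.
def triplet_modulus (array : List Int) (d : Int) : Int :=
  let arr := PySem.List.sorted array (fun x => x) false
  let length : Int := (arr.length : Int)
  let count : Int := 0
  if arr.length < 3 then 0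
  else
    (PySem.List.pyRange 0 (length - 2) 1).foldl (fun count i =>
      (PySem.List.pyRange (i + 1) (length - 1) 1).foldl (fun count j =>
        (PySem.List.pyRange (j + 1) length 1).foldl (fun count k =>
          if PySem.Int.mod (PySem.List.pyGetD arr i 0 + PySem.List.pyGetD arr j 0 +
              PySem.List.pyGetD arr k 0) d == 0 then count + 1 else count) count) count) count

-- ===== PORT B =====
-- Literal transliteration of Source B: one foldl over the array keeping (total, cnt2, seen).
def triplet_modulus_alt (array : List Int) (d : Int) : Int :=
  if array.length < 3 then 0
  else
    (array.foldl
      (fun (st : Int × PySem.Dict Int Int × List Int) x =>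
        let total := st.1 + st.2.1.getD (PySem.Int.mod (-x) d) 0
        let cnt2 := st.2.2.foldl
          (fun c2 y => c2.insert (PySem.Int.mod (x + y) d) (c2.getD (PySem.Int.mod (x + y) d) 0 + 1))
          st.2.1
        (total, cnt2, st.2.2 ++ [x]))
      (0, PySem.Dict.empty, [])).1

-- ===== PRECONDITION & SPEC =====
-- A raises ZeroDivisionError exactly when the list has at least 3 elements and d = 0
-- (with fewer than 3 elements it returns 0 before dividing); those inputs are excluded.
def Pre_triplet_modulus (array : List Int) (d : Int) : Prop := array.length < 3 ∨ d ≠ 0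
instance (array : List Int) (d : Int) : Decidable (Pre_triplet_modulus array d) := by
  unfold Pre_triplet_modulus; infer_instance

def pvWitness_triplet_modulus : List Int × Int := ([3, 1, 2, 9, -4], 3)

def Spec_triplet_modulus (array : List Int) (d : Int) (out : Int) : Prop := out = triplet_modulus_alt array d
instance (array : List Int) (d : Int) (out : Int) : Decidable (Spec_triplet_modulus array d out) := by unfold Spec_triplet_modulus; infer_instance

-- ===== CLAIM (what is proved, stated in full; the proofs are below) =====
def Claim_equal_triplet_modulus : Prop := ∀ (array : List Int) (d : Int), Dom_triplet_modulus array d → Pre_triplet_modulus array d → Spec_triplet_modulus array d (triplet_modulus array d)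

-- ===== LEMMAS AND PROOFS =====

-- Counting functions used as the common specification of both programs.
-- s1 d t l  = #{z ∈ l | (t+z) % d == 0}
def s1 (d t : Int) (l : List Int) : Int :=
  (l.countP (fun z => PySem.Int.mod (t + z) d == 0) : Int)

-- p2 d t l  = #{(i,j) | i < j, (t + l[i] + l[j]) % d == 0}
def p2 (d t : Int) : List Int → Int
  | [] => 0
  | y :: ys => s1 d (t + y) ys + p2 d t ys

-- t3 d l  = #{(i,j,k) | i < j < k, (l[i]+l[j]+l[k]) % d == 0}
def t3 (d : Int) : List Int → Int
  | [] => 0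
  | y :: ys => p2 d y ys + t3 d ys

-- q2 d x l = #{(i,j) | i < j, (l[i]+l[j]+x) % d == 0}
def q2 (d x : Int) : List Int → Int
  | [] => 0
  | y :: ys => (ys.countP (fun z => PySem.Int.mod (y + z + x) d == 0) : Int) + q2 d x ys

-- pr2 d r l = #{(i,j) | i < j, (l[i]+l[j]) % d == r}
def pr2 (d r : Int) : List Int → Int
  | [] => 0
  | y :: ys => (ys.countP (fun z => PySem.Int.mod (y + z) d == r) : Int) + pr2 d r ys

-- ---- mod arithmetic ----
lemma mod_eq_mod_iff_dvd (a b d : Int) :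
    PySem.Int.mod a d = PySem.Int.mod b d ↔ d ∣ a - b := by
  rw [show PySem.Int.mod a d = a.fmod d from rfl, show PySem.Int.mod b d = b.fmod d from rfl,
    Int.fmod_eq_fmod_iff_fmod_sub_eq_zero]
  exact PySem.Int.mod_eq_zero_iff_dvd (a - b) d

lemma mod_key (a x d : Int) :
    (PySem.Int.mod (a + x) d == 0) = (PySem.Int.mod a d == PySem.Int.mod (-x) d) := by
  rw [Bool.eq_iff_iff]
  simp only [beq_iff_eq, PySem.Int.mod_eq_zero_iff_dvd, mod_eq_mod_iff_dvd, sub_neg_eq_add]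

-- ---- A-side: the triple index loop computes t3 of the (sorted) list ----
lemma inner_loop (L : List Int) (d t acc : Int) (j : Int) (h0 : 0 ≤ j) :
    (PySem.List.pyRange j (L.length : Int) 1).foldl
      (fun c k => if PySem.Int.mod (t + PySem.List.pyGetD L k 0) d == 0 then c + 1 else c) acc
    = acc + s1 d t (L.drop j.toNat) := by
  rw [PySem.List.foldl_pyRange_pyGetD' L 0 (fun c z => if PySem.Int.mod (t + z) d == 0 then c + 1 else c) acc h0,
    PySem.List.foldl_if_add_one]
  rfl

lemma mid_loop (L : List Int) (d t : Int) :
    ∀ (s : List Int) (j : Int) (acc : Int), 0 ≤ j → j.toNat + s.length = L.length →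
      L.drop j.toNat = s →
    (PySem.List.pyRange j ((L.length : Int) - 1) 1).foldl
      (fun c jj =>
        (PySem.List.pyRange (jj + 1) (L.length : Int) 1).foldl
          (fun c2 k => if PySem.Int.mod (t + PySem.List.pyGetD L jj 0 + PySem.List.pyGetD L k 0) d == 0
            then c2 + 1 else c2) c) acc
    = acc + p2 d t s := by
  intro s
  induction s with
  | nil =>
    intro j acc h0 hlen hdrop
    simp only [List.length_nil] at hlen
    rw [PySem.List.pyRange_one_eq_nil (by omega)]
    simp [p2]
  | cons y rest ih =>
    intro j acc h0 hlen hdrop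
    rcases rest with _ | ⟨z, rest'⟩
    · simp only [List.length_cons, List.length_nil] at hlen
      rw [PySem.List.pyRange_one_eq_nil (by omega)]
      simp [p2, s1]
    · simp only [List.length_cons] at hlen
      have hjlt : j < (L.length : Int) := by omega
      have hlt : j < (L.length : Int) - 1 := by omega
      rw [PySem.List.pyRange_one_cons hlt, List.foldl_cons]
      have hget : PySem.List.pyGetD L j 0 = y := by
        rw [PySem.List.pyGetD_eq_getElem L 0 h0 hjlt]
        have h2 := List.getElem_cons_drop (as := L) (i := j.toNat) (by omega)
        rw [hdrop] at h2
        injection h2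
      rw [hget, inner_loop L d (t + y) acc (j+1) (by omega)]
      have hdrop1 : L.drop (j+1).toNat = z :: rest' := by
        rw [show (j+1).toNat = j.toNat + 1 by omega, ← List.drop_drop, hdrop]
        rfl
      rw [hdrop1]
      rw [ih (j+1) _ (by omega) (by simp only [List.length_cons]; omega) hdrop1]
      simp [p2]
      ring

lemma outer_loop (L : List Int) (d : Int) :
    ∀ (s : List Int) (j : Int) (acc : Int), 0 ≤ j → j.toNat + s.length = L.length →
      L.drop j.toNat = s →
    (PySem.List.pyRange j ((L.length : Int) - 2) 1).foldl
      (fun c i =>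
        (PySem.List.pyRange (i + 1) ((L.length : Int) - 1) 1).foldl
          (fun c1 jj =>
            (PySem.List.pyRange (jj + 1) (L.length : Int) 1).foldl
              (fun c2 k => if PySem.Int.mod (PySem.List.pyGetD L i 0 + PySem.List.pyGetD L jj 0 + PySem.List.pyGetD L k 0) d == 0
                then c2 + 1 else c2) c1) c) acc
    = acc + t3 d s := by
  intro s
  induction s with
  | nil =>
    intro j acc h0 hlen hdrop
    simp only [List.length_nil] at hlen
    rw [PySem.List.pyRange_one_eq_nil (by omega)]
    simp [t3]
  | cons y rest ih =>
    intro j acc h0 hlen hdrop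
    rcases rest with _ | ⟨z, rest'⟩
    · simp only [List.length_cons, List.length_nil] at hlen
      rw [PySem.List.pyRange_one_eq_nil (by omega)]
      simp [t3, p2]
    · rcases rest' with _ | ⟨w, rest''⟩
      · simp only [List.length_cons, List.length_nil] at hlen
        rw [PySem.List.pyRange_one_eq_nil (by omega)]
        simp [t3, p2, s1]
      · simp only [List.length_cons] at hlen
        have hjlt : j < (L.length : Int) := by omega
        have hlt : j < (L.length : Int) - 2 := by omega
        rw [PySem.List.pyRange_one_cons hlt, List.foldl_cons]
        have hget : PySem.List.pyGetD L j 0 = y := by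
          rw [PySem.List.pyGetD_eq_getElem L 0 h0 hjlt]
          have h2 := List.getElem_cons_drop (as := L) (i := j.toNat) (by omega)
          rw [hdrop] at h2
          injection h2
        have hdrop1 : L.drop (j+1).toNat = z :: w :: rest'' := by
          rw [show (j+1).toNat = j.toNat + 1 by omega, ← List.drop_drop, hdrop]
          rfl
        rw [hget,
          mid_loop L d y (z :: w :: rest'') (j+1) acc (by omega)
            (by simp only [List.length_cons]; omega) hdrop1,
          ih (j+1) _ (by omega) (by simp only [List.length_cons]; omega) hdrop1]
        simp [t3]
        ring

lemma t3_short (d : Int) (l : List Int) (h : l.length < 3) : t3 d l = 0 := by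
  rcases l with _ | ⟨a, _ | ⟨b, _ | ⟨c, r⟩⟩⟩ <;> simp_all [t3, p2, s1] <;> omega

lemma portA_eq_t3 (array : List Int) (d : Int) :
    triplet_modulus array d = t3 d (PySem.List.sorted array (fun x => x) false) := by
  unfold triplet_modulus
  set L := PySem.List.sorted array (fun x => x) false with hL
  by_cases h : L.length < 3
  · simp only [if_pos h]
    exact (t3_short d L h).symm
  · simp only [if_neg h]
    rw [outer_loop L d L 0 0 le_rfl (by simp) (by simp)]
    ring

-- ---- t3 is invariant under permutation ----
lemma s1_perm (d t : Int) {l1 l2 : List Int} (h : l1.Perm l2) : s1 d t l1 = s1 d t l2 := by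
  simp [s1, h.countP_eq]

lemma p2_perm (d : Int) {l1 l2 : List Int} (h : l1.Perm l2) : ∀ t, p2 d t l1 = p2 d t l2 := by
  induction h with
  | nil => intro t; rfl
  | cons y _ ih =>
    intro t
    simp only [p2, ih]
    rw [s1_perm d (t + y) (by assumption)]
  | swap y z l =>
    intro t
    simp only [p2, s1, List.countP_cons]
    have h1 : t + z + y = t + y + z := by ring
    rw [h1]
    push_cast
    ring
  | trans _ _ ih1 ih2 => intro t; rw [ih1 t, ih2 t]

lemma t3_perm (d : Int) {l1 l2 : List Int} (h : l1.Perm l2) : t3 d l1 = t3 d l2 := by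
  induction h with
  | nil => rfl
  | cons y hp ih =>
    simp only [t3, ih]
    rw [p2_perm d hp y]
  | swap y z l =>
    simp only [t3, p2, s1]
    have h1 : z + y = y + z := by ring
    rw [h1]
    ring
  | trans _ _ ih1 ih2 => rw [ih1, ih2]

-- ---- append (suffix-growing) characterisations used by B's left-to-right pass ----
lemma p2_append (d t x : Int) (l : List Int) :
    p2 d t (l ++ [x]) = p2 d t l + (l.countP (fun z => PySem.Int.mod (t + z + x) d == 0) : Int) := by
  induction l with
  | nil => simp [p2, s1]
  | cons a l ihp =>
    simp only [List.cons_append, p2, ihp, s1, List.countP_append, List.countP_cons,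
      List.countP_nil]
    push_cast
    have hcomm : (fun z => PySem.Int.mod (t + a + z) d == 0) =
        (fun z => PySem.Int.mod (t + (a + z)) d == 0) := by
      funext z; rw [add_assoc]
    rw [hcomm]
    ring_nf

lemma t3_append (d x : Int) (l : List Int) :
    t3 d (l ++ [x]) = t3 d l + q2 d x l := by
  induction l with
  | nil => simp [t3, p2, q2]
  | cons y l ih =>
    simp only [List.cons_append, t3, ih, q2, p2_append]
    ring

lemma pr2_append (d r x : Int) (l : List Int) :
    pr2 d r (l ++ [x]) = pr2 d r l + (l.countP (fun y => PySem.Int.mod (y + x) d == r) : Int) := by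
  induction l with
  | nil => simp [pr2]
  | cons a l ihp =>
    simp only [List.cons_append, pr2, ihp, List.countP_append, List.countP_cons, List.countP_nil]
    push_cast
    ring_nf

lemma q2_eq_pr2 (d x : Int) (l : List Int) :
    q2 d x l = pr2 d (PySem.Int.mod (-x) d) l := by
  induction l with
  | nil => rfl
  | cons y l ih =>
    simp only [q2, pr2, ih]
    congr 1
    congr 1
    apply List.countP_congr
    intro z _
    rw [mod_key (y + z) x d]

-- ---- the dict counting loop over 'seen' ----
lemma getD_foldl_insert_key (f : Int → Int) (l : List Int) :
    ∀ (c2 : PySem.Dict Int Int) (r : Int),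
    (l.foldl (fun c2 y => c2.insert (f y) (c2.getD (f y) 0 + 1)) c2).getD r 0
      = c2.getD r 0 + (l.countP (fun y => f y == r) : Int) := by
  induction l with
  | nil => simp
  | cons a l ih =>
    intro c2 r
    simp only [List.foldl_cons, ih, List.countP_cons, PySem.Dict.getD_insert]
    by_cases h : r = f a
    · simp [h]
      push_cast
      ring
    · have hb : (f a == r) = false := by
        simp only [beq_eq_false_iff_ne, ne_eq]
        exact fun hh => h hh.symm
      simp [h, hb]

-- ---- B's loop invariant ----
lemma portB_inv (d : Int) (p : List Int) :
    ∃ c2 : PySem.Dict Int Int,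
      p.foldl
        (fun (st : Int × PySem.Dict Int Int × List Int) x =>
          let total := st.1 + st.2.1.getD (PySem.Int.mod (-x) d) 0
          let cnt2 := st.2.2.foldl
            (fun c2 y => c2.insert (PySem.Int.mod (x + y) d) (c2.getD (PySem.Int.mod (x + y) d) 0 + 1))
            st.2.1
          (total, cnt2, st.2.2 ++ [x]))
        (0, PySem.Dict.empty, [])
      = (t3 d p, c2, p)
      ∧ ∀ w, c2.getD (PySem.Int.mod w d) 0 = pr2 d (PySem.Int.mod w d) p := by
  induction p using List.reverseRecOn with
  | nil => exact ⟨PySem.Dict.empty, rfl, fun w => by simp [pr2]⟩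
  | append_singleton p x ih =>
    obtain ⟨c2, heq, hinv⟩ := ih
    rw [List.foldl_append, heq]
    refine ⟨p.foldl (fun c2 y => c2.insert (PySem.Int.mod (x + y) d)
        (c2.getD (PySem.Int.mod (x + y) d) 0 + 1)) c2, ?_, ?_⟩
    · rw [List.foldl_cons, List.foldl_nil]
      congr 2
      rw [hinv (-x), t3_append, q2_eq_pr2]
    · intro w
      rw [getD_foldl_insert_key, hinv w, pr2_append]
      congr 1
      push_cast
      congr 1
      apply List.countP_congr
      intro y _
      rw [add_comm x y]

lemma portB_eq_t3 (array : List Int) (d : Int) :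
    triplet_modulus_alt array d = if array.length < 3 then 0 else t3 d array := by
  unfold triplet_modulus_alt
  by_cases h : array.length < 3
  · simp [h]
  · simp only [if_neg h]
    obtain ⟨c2, heq, -⟩ := portB_inv d array
    rw [heq]

-- ===== VERDICT (by name: the statement is the Claim_ definition above) =====
theorem triplet_modulus_spec : Claim_equal_triplet_modulus := by
  intro array d _ _
  unfold Spec_triplet_modulus
  rw [portA_eq_t3, portB_eq_t3,
    t3_perm d (PySem.List.sorted_perm array (fun x => x) false)]
  by_cases h : array.length < 3
  · rw [if_pos h, t3_short d array h]
  · rw [if_neg h]
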